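-- pv_equiv track=rewrite | github.com/juancamilosotocardona/repaso-de-la-u- | punto4.py | analizar_texto
-- ===== SOURCE A (Python) =====
-- def analizar_texto(texto: str) -> tuple[int, int, str]:
--     # validar texto no vacío
--     if not texto.strip():
--         raise ValueError("El texto no puede estar vacío")
--
--     def contar_palabras(t: str) -> int:
--         # separar por espacios y contar
--         return len(t.split())
--
--     def contar_vocales(t: str) -> int:
--         # contar vocales mayúsculas y minúsculas
--         vocales = "aeiouAEIOU"
--         return sum(1 for c in t if c in vocales)
--
--     def palabra_mas_larga(t: str) -> str:
--         # dividir en palabras y encontrar la más larga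
--         palabras = t.split()
--         return max(palabras, key=len) if palabras else ""
--
--     # retornar tupla con resultados
--     return (contar_palabras(texto), contar_vocales(texto), palabra_mas_larga(texto))
-- ===== SOURCE B (Python) =====
-- def analizar_texto(texto: str) -> tuple[int, int, str]:
--     # validar texto no vacío
--     if not texto.strip():
--         raise ValueError("El texto no puede estar vacío")
--     vocales = "aeiouAEIOU"
--     cuenta = 0
--     num_vocales = 0
--     mas_larga = ""
--     # single fused pass over the words
--     for palabra in texto.split():
--         cuenta += 1
--         for c in palabra:
--             if c in vocales:
--                 num_vocales += 1
--         if len(palabra) > len(mas_larga):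
--             mas_larga = palabra
--     return (cuenta, num_vocales, mas_larga)
-- ===== Notes on version B (the rewrite author's own statement) =====
-- stated objective: simpler
-- what changed: Replaces A's three separate scans (len(split), a vowel scan of the whole text, max(split, key=len)) by one fused loop over texto.split() maintaining a word counter, a running vowel total and the longest-so-far word updated on strict greater length.
import Mathlib
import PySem

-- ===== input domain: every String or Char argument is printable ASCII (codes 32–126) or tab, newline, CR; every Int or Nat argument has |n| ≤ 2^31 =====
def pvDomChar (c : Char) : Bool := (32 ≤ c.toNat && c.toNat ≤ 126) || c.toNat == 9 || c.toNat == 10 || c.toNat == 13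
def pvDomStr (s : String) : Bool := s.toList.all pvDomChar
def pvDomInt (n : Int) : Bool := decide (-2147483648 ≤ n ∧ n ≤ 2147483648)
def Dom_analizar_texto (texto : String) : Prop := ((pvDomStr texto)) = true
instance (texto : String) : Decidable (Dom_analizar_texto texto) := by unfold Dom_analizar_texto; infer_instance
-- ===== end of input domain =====

-- B fuses A's three separate scans into one loop over the split words (objective: simpler).

-- ===== PORT A =====
-- A's nested helper defs, as top-level helpers
def pvContarPalabras (t : String) : Int := ((PySem.Str.split₀ t).length : Int)

def pvContarVocales (t : String) : Int :=
  let vocales := "aeiouAEIOU".toList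
  t.toList.foldl (fun s c => if PySem.Chars.isIn [c] vocales then s + 1 else s) 0

def pvPalabraMasLarga (t : String) : String :=
  let palabras := PySem.Str.split₀ t
  if ¬ palabras.isEmpty then
    match PySem.List.max? palabras (fun w => (PySem.Str.len w : Int)) with
    | some m => m
    | none => ""
  else ""

def analizar_texto (texto : String) : Int × Int × String :=
  -- 'if not texto.strip(): raise ValueError' — the raising inputs are excluded by Pre_
  if PySem.Str.strip texto = "" then (0, 0, "")
  else (pvContarPalabras texto, pvContarVocales texto, pvPalabraMasLarga texto)

-- ===== PORT B =====
def analizar_texto_alt (texto : String) : Int × Int × String :=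
  -- same guard: Python B raises ValueError on whitespace-only input; excluded by Pre_
  if PySem.Str.strip texto = "" then (0, 0, "")
  else
    let vocales := "aeiouAEIOU".toList
    (PySem.Str.split₀ texto).foldl
      (fun acc palabra =>
        (acc.1 + 1,
         palabra.toList.foldl (fun nv c => if PySem.Chars.isIn [c] vocales then nv + 1 else nv) acc.2.1,
         if (PySem.Str.len palabra : Int) > (PySem.Str.len acc.2.2 : Int) then palabra else acc.2.2))
      (0, 0, "")

-- ===== PRECONDITION & SPEC =====
-- Pre_ excludes whitespace-only texts, on which both Pythons raise ValueError
def Pre_analizar_texto (texto : String) : Prop := PySem.Str.strip texto ≠ ""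
instance (texto : String) : Decidable (Pre_analizar_texto texto) := by unfold Pre_analizar_texto; infer_instance

def pvWitness_analizar_texto : String := "hola mundo"

def Spec_analizar_texto (texto : String) (out : Int × Int × String) : Prop := out = analizar_texto_alt texto
instance (texto : String) (out : Int × Int × String) : Decidable (Spec_analizar_texto texto out) := by unfold Spec_analizar_texto; infer_instance

-- ===== CLAIM (what is proved, stated in full; the proofs are below) =====
def Claim_equal_analizar_texto : Prop := ∀ (texto : String), Dom_analizar_texto texto → Pre_analizar_texto texto → Spec_analizar_texto texto (analizar_texto texto)

-- ===== LEMMAS AND PROOFS =====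

theorem pv_vstep_space (a : Int) (c : Char) (h : PySem.Chars.isspace c = true) :
    (if PySem.Chars.isIn [c] "aeiouAEIOU".toList then a + 1 else a) = a := by
  cases hin : PySem.Chars.isIn [c] "aeiouAEIOU".toList with
  | false => simp
  | true =>
    exfalso
    rw [PySem.Chars.isIn_iff_infix] at hin
    have hc : c ∈ "aeiouAEIOU".toList := hin.subset (List.mem_singleton_self c)
    rw [show ("aeiouAEIOU".toList) = ['a','e','i','o','u','A','E','I','O','U'] from rfl] at hc
    fin_cases hc <;> simp [PySem.Chars.isspace] at h

theorem pv_max?_foldl (ps : List String) (m : String) :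
    PySem.List.max? (m :: ps) (fun w => PySem.Str.len w) =
      some (ps.foldl (fun b x => if PySem.Str.len x > PySem.Str.len b then x else b) m) := by
  induction ps generalizing m with
  | nil => rfl
  | cons x t ih =>
    have h1 : PySem.List.max? (m :: x :: t) (fun w => PySem.Str.len w)
        = PySem.List.max? ((if PySem.Str.len m < PySem.Str.len x then x else m) :: t)
            (fun w => PySem.Str.len w) := by
      simp only [PySem.List.max?, List.foldl_cons]
      split_ifs <;> rfl
    rw [h1, ih, List.foldl_cons]

theorem pv_go_foldl (f : Int → Char → Int)
    (hf : ∀ a c, PySem.Chars.isspace c = true → f a c = a) :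
    ∀ (cs cur : List Char) (acc : List (List Char)) (a : Int),
    (PySem.Chars.split₀.go cs cur acc).foldl (fun b w => w.foldl f b) a
      = cs.foldl f (cur.reverse.foldl f (acc.reverse.foldl (fun b w => w.foldl f b) a)) := by
  intro cs
  induction cs with
  | nil =>
    intro cur acc a
    by_cases hcur : cur = []
    · subst hcur; simp [PySem.Chars.split₀.go]
    · simp [PySem.Chars.split₀.go, List.isEmpty_iff, hcur, List.reverse_cons, List.foldl_append]
  | cons c rest ih =>
    intro cur acc a
    by_cases hs : PySem.Chars.isspace c = true
    · by_cases hcur : cur = []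
      · subst hcur
        simp [PySem.Chars.split₀.go, hs, ih, hf _ _ hs]
      · simp [PySem.Chars.split₀.go, hs, List.isEmpty_iff, hcur, ih, List.reverse_cons,
          List.foldl_append, hf _ _ hs]
    · simp [PySem.Chars.split₀.go, hs, ih, List.reverse_cons, List.foldl_append]

theorem pv_go_words_ne_nil :
    ∀ (cs cur : List Char) (acc : List (List Char)), (∀ w ∈ acc, w ≠ []) →
    ∀ w ∈ PySem.Chars.split₀.go cs cur acc, w ≠ [] := by
  intro cs
  induction cs with
  | nil =>
    intro cur acc hacc w hw
    by_cases hcur : cur = []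
    · subst hcur; simp [PySem.Chars.split₀.go] at hw; exact hacc _ hw
    · simp [PySem.Chars.split₀.go, List.isEmpty_iff, hcur] at hw
      rcases hw with hw | hw
      · exact hacc _ hw
      · subst hw; simpa using hcur
  | cons c rest ih =>
    intro cur acc hacc w hw
    by_cases hs : PySem.Chars.isspace c = true
    · by_cases hcur : cur = []
      · subst hcur
        rw [show PySem.Chars.split₀.go (c :: rest) [] acc = PySem.Chars.split₀.go rest [] acc from by
          simp [PySem.Chars.split₀.go, hs]] at hw
        exact ih _ _ hacc _ hw
      · rw [show PySem.Chars.split₀.go (c :: rest) cur acc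
            = PySem.Chars.split₀.go rest [] (cur.reverse :: acc) from by
          simp [PySem.Chars.split₀.go, hs, List.isEmpty_iff, hcur]] at hw
        refine ih _ _ ?_ _ hw
        intro v hv
        rcases List.mem_cons.mp hv with hv | hv
        · subst hv; simpa using hcur
        · exact hacc _ hv
    · rw [show PySem.Chars.split₀.go (c :: rest) cur acc
          = PySem.Chars.split₀.go rest (c :: cur) acc from by
        simp [PySem.Chars.split₀.go, hs]] at hw
      exact ih _ _ hacc _ hw

theorem pv_go_ne_nil :
    ∀ (cs cur : List Char) (acc : List (List Char)),
    (cs.any (fun c => !PySem.Chars.isspace c) = true ∨ cur ≠ [] ∨ acc ≠ []) →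
    PySem.Chars.split₀.go cs cur acc ≠ [] := by
  intro cs
  induction cs with
  | nil =>
    intro cur acc h
    by_cases hcur : cur = []
    · subst hcur
      simp [PySem.Chars.split₀.go]
      rcases h with h | h | h <;> simp_all
    · simp [PySem.Chars.split₀.go, List.isEmpty_iff, hcur]
  | cons c rest ih =>
    intro cur acc h
    by_cases hs : PySem.Chars.isspace c = true
    · by_cases hcur : cur = []
      · subst hcur
        rw [show PySem.Chars.split₀.go (c :: rest) [] acc = PySem.Chars.split₀.go rest [] acc from by
          simp [PySem.Chars.split₀.go, hs]]
        apply ih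
        rcases h with h | h | h
        · left; simp [List.any_cons, hs] at h; simp [h]
        · simp at h
        · right; right; exact h
      · rw [show PySem.Chars.split₀.go (c :: rest) cur acc
            = PySem.Chars.split₀.go rest [] (cur.reverse :: acc) from by
          simp [PySem.Chars.split₀.go, hs, List.isEmpty_iff, hcur]]
        apply ih
        right; right; simp
    · rw [show PySem.Chars.split₀.go (c :: rest) cur acc
          = PySem.Chars.split₀.go rest (c :: cur) acc from by
        simp [PySem.Chars.split₀.go, hs]]
      apply ih
      right; left; simp

theorem pv_strip_ne_nil_any (cs : List Char) (h : PySem.Chars.strip cs ≠ []) :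
    cs.any (fun c => !PySem.Chars.isspace c) = true := by
  by_contra hall
  apply h
  have hall' : ∀ c ∈ cs, PySem.Chars.isspace c = true := by
    intro c hc
    by_contra hcs
    exact hall (List.any_eq_true.mpr ⟨c, hc, by simp [hcs]⟩)
  have hd : cs.dropWhile PySem.Chars.isspace = [] := List.dropWhile_eq_nil_iff.mpr (by
    intro c hc; exact hall' c hc)
  simp [PySem.Chars.strip, PySem.Chars.lstrip, PySem.Chars.rstrip, hd]

theorem pv_count_foldl (l : List String) (a : Int) :
    l.foldl (fun a _ => a + 1) a = a + l.length := by
  induction l generalizing a with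
  | nil => simp
  | cons x t ih => simp [List.foldl_cons, ih]; ring

-- ===== VERDICT (by name: the statement is the Claim_ definition above) =====
theorem analizar_texto_spec : Claim_equal_analizar_texto := by
  intro texto _ hPre
  unfold Pre_analizar_texto at hPre
  unfold Spec_analizar_texto analizar_texto analizar_texto_alt
  rw [if_neg hPre, if_neg hPre]
  -- split B's triple-state fold into three component folds
  rw [show ((0 : Int), (0 : Int), ("" : String)) = (((0 : Int), ((0 : Int), ("" : String))) : Int × Int × String) from rfl]
  rw [PySem.List.foldl_prod_mk
      (fun (a : Int) (_ : String) => a + 1)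
      (fun (p : Int × String) (palabra : String) =>
        (palabra.toList.foldl (fun nv c => if PySem.Chars.isIn [c] "aeiouAEIOU".toList then nv + 1 else nv) p.1,
         if (PySem.Str.len palabra : Int) > (PySem.Str.len p.2 : Int) then palabra else p.2))]
  rw [PySem.List.foldl_prod_mk
      (fun (nv : Int) (palabra : String) =>
        palabra.toList.foldl (fun nv c => if PySem.Chars.isIn [c] "aeiouAEIOU".toList then nv + 1 else nv) nv)
      (fun (b : String) (palabra : String) =>
        if (PySem.Str.len palabra : Int) > (PySem.Str.len b : Int) then palabra else b)]
  -- facts about the split words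
  have hany : texto.toList.any (fun c => !PySem.Chars.isspace c) = true := by
    apply pv_strip_ne_nil_any
    intro h0
    exact hPre (String.toList_eq_nil_iff.mp (by simp [PySem.Str.toList_strip, h0]))
  have hgo_ne : PySem.Chars.split₀.go texto.toList [] [] ≠ [] :=
    pv_go_ne_nil _ _ _ (Or.inl hany)
  have hws_ne : PySem.Str.split₀ texto ≠ [] := by
    simp [PySem.Str.split₀, PySem.Chars.split₀, hgo_ne]
  refine Prod.ext ?_ (Prod.ext ?_ ?_)
  · -- word count
    simp [pvContarPalabras, pv_count_foldl]
  · -- vowel count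
    simp only [pvContarVocales]
    rw [show PySem.Str.split₀ texto = (PySem.Chars.split₀ texto.toList).map String.ofList from rfl]
    rw [List.foldl_map]
    simp only [String.toList_ofList]
    rw [show PySem.Chars.split₀ texto.toList = PySem.Chars.split₀.go texto.toList [] [] from rfl]
    rw [pv_go_foldl _ (fun a c hc => pv_vstep_space a c hc)]
    simp
  · -- longest word
    obtain ⟨w0, ps, hws⟩ := List.exists_cons_of_ne_nil hws_ne
    have hw0len : (PySem.Str.len ("" : String) : Int) < (PySem.Str.len w0 : Int) := by
      have hw0 : w0 ∈ PySem.Str.split₀ texto := by rw [hws]; exact List.mem_cons_self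
      rw [show PySem.Str.split₀ texto = (PySem.Chars.split₀ texto.toList).map String.ofList from rfl] at hw0
      obtain ⟨u, hu, rfl⟩ := List.mem_map.mp hw0
      have hune : u ≠ [] := pv_go_words_ne_nil _ _ _ (by simp) _ hu
      have : 0 < u.length := List.length_pos_iff.mpr hune
      simp [PySem.Str.len_eq]
      omega
    simp only [pvPalabraMasLarga, hws]
    rw [if_pos (by simp)]
    rw [pv_max?_foldl ps w0]
    rw [List.foldl_cons, if_pos (by simpa [gt_iff_lt] using hw0len)]
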